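-- pv_equiv track=rewrite | github.com/sungyujeon/problem-solving | others/line/2022-1/2.py | setUnion
-- ===== SOURCE A (Python) =====
-- def setUnion(sentences, N):
--     union_dict = {}
--     for i in range(N):
--         union_dict[i] = []
--
--     for i in range(N):
--         for j in range(i+1, N):
--             set_a = sentences[i][0]
--             set_b = sentences[j][0]
--
--             if set_b.issubset(set_a):
--                 union_dict[i].append(j)
--             if set_a.issubset(set_b):
--                 union_dict[j].append(i)
--     return union_dict
-- ===== SOURCE B (Python) =====
-- def setUnion(sentences, N):
--     # size-pruned pass: sort indices by set size; m can only be a subset of k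
--     # when len(m-set) <= len(k-set), so each key scans just a prefix.
--     union_dict = {k: [] for k in range(N)}
--     if N < 2:
--         return union_dict  # no pairs to compare
--     sets = [sentences[k][0] for k in range(N)]
--     sizes = [len(s) for s in sets]
--     order = sorted(range(N), key=lambda m: sizes[m])
--     for k in range(N):
--         acc = []
--         for m in order:
--             if sizes[m] > sizes[k]:
--                 break
--             if m != k and sets[m] <= sets[k]:
--                 acc.append(m)
--         acc.sort()
--         union_dict[k] = acc
--     return union_dict
-- ===== Notes on version B (the rewrite author's own statement) =====
-- stated objective: alternative
-- what changed: A fills the dict through a triangular double loop that appends to two keys per pair; B precomputes each set's cardinality, sorts the indices by size once, and builds each key's list independently in a single size-pruned scan (breaking as soon as the remaining candidates are larger than the key's set), sorting each list at the end.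
import Mathlib
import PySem

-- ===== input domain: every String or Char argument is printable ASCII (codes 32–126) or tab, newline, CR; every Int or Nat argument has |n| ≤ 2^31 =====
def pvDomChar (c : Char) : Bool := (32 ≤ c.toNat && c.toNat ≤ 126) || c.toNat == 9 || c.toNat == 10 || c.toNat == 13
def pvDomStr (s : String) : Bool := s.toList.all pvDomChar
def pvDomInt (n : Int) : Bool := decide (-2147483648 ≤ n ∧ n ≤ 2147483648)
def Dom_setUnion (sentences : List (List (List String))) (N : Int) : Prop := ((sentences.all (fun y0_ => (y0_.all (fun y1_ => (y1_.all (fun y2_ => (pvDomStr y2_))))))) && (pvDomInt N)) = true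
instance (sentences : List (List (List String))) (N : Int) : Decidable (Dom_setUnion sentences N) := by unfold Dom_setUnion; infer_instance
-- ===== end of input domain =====

-- B replaces A's triangular double loop (two appends per pair) by one size-pruned scan per key
-- over the indices pre-sorted by set cardinality; same return value (a fresh dict), no mutation of inputs.

-- ===== PORT A =====
-- sentences[i][0]; total via getD — inside Pre_ the Python indexing is in range, so the defaults are never hit
def pvGetSet (sentences : List (List (List String))) (i : Int) : List String :=
  (PySem.List.pyGet? ((PySem.List.pyGet? sentences i).getD []) 0).getD []

def setUnion (sentences : List (List (List String))) (N : Int) : List (Int × List Int) :=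
  let d0 : PySem.Dict Int (List Int) :=
    (PySem.List.pyRange 0 N).foldl (fun d i => d.insert i ([] : List Int)) PySem.Dict.empty
  let d :=
    (PySem.List.pyRange 0 N).foldl (fun d i =>
      (PySem.List.pyRange (i+1) N).foldl (fun d j =>
        let setA := pvGetSet sentences i
        let setB := pvGetSet sentences j
        let d1 := if PySem.Set.issubset setB setA then d.modify i [] (fun l => l ++ [j]) else d
        if PySem.Set.issubset setA setB then d1.modify j [] (fun l => l ++ [i]) else d1) d) d0
  d.items

-- ===== PORT B =====
-- the inner 'for m in order: if sizes[m] > sizes[k]: break …' loop of Source B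
def pvCollect (sets : List (List String)) (sizes : List Int) (k : Int) : List Int → List Int
  | [] => []
  | m :: rest =>
    if PySem.List.pyGetD sizes k 0 < PySem.List.pyGetD sizes m 0 then []
    else if m ≠ k ∧ PySem.Set.issubset (PySem.List.pyGetD sets m []) (PySem.List.pyGetD sets k []) = true
      then m :: pvCollect sets sizes k rest
      else pvCollect sets sizes k rest

def setUnion_alt (sentences : List (List (List String))) (N : Int) : List (Int × List Int) :=
  let d0 : PySem.Dict Int (List Int) :=
    (PySem.List.pyRange 0 N).foldl (fun d k => d.insert k ([] : List Int)) PySem.Dict.empty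
  if N < 2 then d0.items  -- no pairs to compare
  else
    let sets := (PySem.List.pyRange 0 N).map (fun k => pvGetSet sentences k)
    -- len of a Python set = number of distinct elements of the list modelling it
    let sizes := sets.map (fun s => ((PySem.Set.ofList s).length : Int))
    let order := PySem.List.sorted (PySem.List.pyRange 0 N) (fun m => PySem.List.pyGetD sizes m 0)
    ((PySem.List.pyRange 0 N).foldl (fun d k =>
        d.insert k (PySem.List.sorted (pvCollect sets sizes k order) (fun x => x))) d0).items

-- ===== PRECONDITION & SPEC =====
-- Pre_ excludes exactly the inputs on which A raises IndexError: N ≥ 2 with a missing or empty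
-- row among the first N (for N ≤ 1 A's pair loop is empty and never indexes, so no constraint).
def Pre_setUnion (sentences : List (List (List String))) (N : Int) : Prop :=
  2 ≤ N → (N ≤ sentences.length ∧ ∀ l ∈ sentences.take N.toNat, l ≠ [])
instance (sentences : List (List (List String))) (N : Int) : Decidable (Pre_setUnion sentences N) := by
  unfold Pre_setUnion; infer_instance

def pvWitness_setUnion : List (List (List String)) × Int := ([[["a"]], [["a", "b"]]], 2)

def Spec_setUnion (sentences : List (List (List String))) (N : Int) (out : List (Int × List Int)) : Prop := out = setUnion_alt sentences N
instance (sentences : List (List (List String))) (N : Int) (out : List (Int × List Int)) : Decidable (Spec_setUnion sentences N out) := by unfold Spec_setUnion; infer_instance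

-- ===== CLAIM (what is proved, stated in full; the proofs are below) =====
def Claim_equal_setUnion : Prop := ∀ (sentences : List (List (List String))) (N : Int), Dom_setUnion sentences N → Pre_setUnion sentences N → Spec_setUnion sentences N (setUnion sentences N)

-- ===== LEMMAS AND PROOFS =====

-- the common value: key k maps to the increasing list of all m with sentences[m][0] ⊆ sentences[k][0], m ≠ k
def pvVal (se : List (List (List String))) (N k : Int) : List Int :=
  (PySem.List.pyRange 0 N).filter
    (fun m => decide (m ≠ k) && PySem.Set.issubset (pvGetSet se m) (pvGetSet se k))

def pvStep (se : List (List (List String))) (d : PySem.Dict Int (List Int)) (p : Int × Int) :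
    PySem.Dict Int (List Int) :=
  let d1 := if PySem.Set.issubset (pvGetSet se p.2) (pvGetSet se p.1) then
      d.modify p.1 [] (fun l => l ++ [p.2]) else d
  if PySem.Set.issubset (pvGetSet se p.1) (pvGetSet se p.2) then
      d1.modify p.2 [] (fun l => l ++ [p.1]) else d1

def pvContrib (se : List (List (List String))) (k : Int) (p : Int × Int) : List Int :=
  (if p.1 = k ∧ PySem.Set.issubset (pvGetSet se p.2) (pvGetSet se p.1) = true then [p.2] else []) ++
  (if p.2 = k ∧ PySem.Set.issubset (pvGetSet se p.1) (pvGetSet se p.2) = true then [p.1] else [])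

def pvPairs (N : Int) : List (Int × Int) :=
  (PySem.List.pyRange 0 N).flatMap (fun i => (PySem.List.pyRange (i+1) N).map (fun j => (i, j)))

def pvD0 (N : Int) : PySem.Dict Int (List Int) :=
  (PySem.List.pyRange 0 N).foldl (fun d i => d.insert i ([] : List Int)) PySem.Dict.empty

lemma pvA_as_pairs (se : List (List (List String))) (N : Int) :
    setUnion se N = ((pvPairs N).foldl (pvStep se) (pvD0 N)).items := by
  simp only [setUnion, pvPairs, pvD0, List.foldl_flatMap, List.foldl_map, pvStep]

lemma pvItems_d0 (N : Int) :
    (pvD0 N).items = (PySem.List.pyRange 0 N).map (fun k => (k, ([] : List Int))) := by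
  have := PySem.Dict.items_foldl_insert_fresh (PySem.List.pyRange 0 N) (fun i => i)
    (fun _ => ([] : List Int)) PySem.Dict.empty
    (by intro a _; simp [PySem.Dict.contains_empty])
    (by simpa using PySem.List.nodup_pyRange_one (a := 0) (b := N))
  simpa [pvD0] using this

lemma pvKeys_d0 (N : Int) : (pvD0 N).keys = PySem.List.pyRange 0 N := by
  simp only [PySem.Dict.keys, pvItems_d0 N, List.map_map]
  exact List.map_id' _

lemma pvGetD_step (se : List (List (List String))) (d : PySem.Dict Int (List Int))
    (p : Int × Int) (k : Int) :
    (pvStep se d p).getD k [] = d.getD k [] ++ pvContrib se k p := by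
  rcases p with ⟨i, j⟩
  simp only [pvStep, pvContrib]
  generalize PySem.Set.issubset (pvGetSet se j) (pvGetSet se i) = b1
  generalize PySem.Set.issubset (pvGetSet se i) (pvGetSet se j) = b2
  cases b1 <;> cases b2 <;> by_cases hik : i = k <;> by_cases hjk : j = k <;>
    simp [hik, hjk, PySem.Dict.getD_modify] <;> (try omega) <;>
      (split_ifs <;> simp_all <;> omega)

lemma pvGetD_foldl (se : List (List (List String))) (ps : List (Int × Int)) (k : Int) :
    ∀ d : PySem.Dict Int (List Int),
      (ps.foldl (pvStep se) d).getD k [] = d.getD k [] ++ ps.flatMap (pvContrib se k) := by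
  induction ps with
  | nil => simp
  | cons p t ih => intro d; simp [List.foldl_cons, ih, pvGetD_step]

lemma pvKeys_step (se : List (List (List String))) (d : PySem.Dict Int (List Int)) (p : Int × Int)
    (h1 : p.1 ∈ d.keys) (h2 : p.2 ∈ d.keys) : (pvStep se d p).keys = d.keys := by
  have c1 : d.contains p.1 = true := (PySem.Dict.contains_iff_mem_keys d p.1).mpr h1
  have c2 : d.contains p.2 = true := (PySem.Dict.contains_iff_mem_keys d p.2).mpr h2
  simp only [pvStep]
  have km : ∀ (d' : PySem.Dict Int (List Int)) (a : Int) (f : List Int → List Int),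
      d'.contains a = true → (d'.modify a [] f).keys = d'.keys := by
    intro d' a f hc
    rw [PySem.Dict.keys_modify, PySem.Dict.keys_insert_of_contains d' _ hc]
  split_ifs with hab hba hba
  · have k1 := km d p.1 (fun l => l ++ [p.2]) c1
    rw [km _ p.2 (fun l => l ++ [p.1]) (by rw [PySem.Dict.contains_iff_mem_keys, k1]; exact h2), k1]
  · exact km d p.2 (fun l => l ++ [p.1]) c2
  · exact km d p.1 (fun l => l ++ [p.2]) c1
  · rfl

lemma pvKeys_foldl (se : List (List (List String))) (ps : List (Int × Int)) :
    ∀ d : PySem.Dict Int (List Int), (∀ p ∈ ps, p.1 ∈ d.keys ∧ p.2 ∈ d.keys) →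
      (ps.foldl (pvStep se) d).keys = d.keys := by
  induction ps with
  | nil => intro d _; rfl
  | cons p t ih =>
    intro d h
    have hp := h p (by simp)
    have hk := pvKeys_step se d p hp.1 hp.2
    rw [List.foldl_cons, ih _ (by intro q hq; rw [hk]; exact h q (by simp [hq])), hk]

lemma pvItems_eq_keys_map (d : PySem.Dict Int (List Int)) (h : d.keys.Nodup) :
    d.items = d.keys.map (fun k => (k, d.getD k [])) := by
  simp only [PySem.Dict.keys, List.map_map]
  conv_lhs => rw [← List.map_id (d.items)]
  apply List.map_congr_left
  intro p hp
  have : d.getD p.1 [] = p.2 := PySem.Dict.getD_of_mem_items d (by exact hp) h []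
  simp [Function.comp, this]

lemma pvFlatMap_ite_singleton (l : List Int) (p : Int → Bool) :
    l.flatMap (fun x => if p x = true then [x] else []) = l.filter p := by
  induction l with
  | nil => rfl
  | cons x t ih => by_cases h : p x = true <;> simp [h, ih]

lemma pvFlatMap_ite_mem (l : List Int) (k : Int) (c : List Int) (hl : l.Nodup) :
    l.flatMap (fun j => if j = k then c else []) = if k ∈ l then c else [] := by
  induction l with
  | nil => simp
  | cons x t ih =>
    rcases List.nodup_cons.mp hl with ⟨hx, ht⟩
    by_cases h : x = k
    · subst h
      simp [ih ht, hx]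
    · simp [h, ih ht, Ne.symm h]

lemma pvContrib_flatMap (se : List (List (List String))) (N k : Int)
    (hk : k ∈ PySem.List.pyRange 0 N) :
    (pvPairs N).flatMap (pvContrib se k) = pvVal se N k := by
  rcases PySem.List.mem_pyRange_one.mp hk with ⟨hk0, hkN⟩
  have hsplit : PySem.List.pyRange 0 N =
      PySem.List.pyRange 0 k ++ (k :: PySem.List.pyRange (k+1) N) := by
    rw [PySem.List.pyRange_one_append 0 k N hk0 (le_of_lt hkN),
      PySem.List.pyRange_one_cons hkN]
  have inner_lo : ∀ i ∈ PySem.List.pyRange 0 k,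
      (PySem.List.pyRange (i+1) N).flatMap (fun j => pvContrib se k (i, j)) =
      (if PySem.Set.issubset (pvGetSet se i) (pvGetSet se k) = true then [i] else []) := by
    intro i hi
    rcases PySem.List.mem_pyRange_one.mp hi with ⟨hi0, hik⟩
    have : ∀ j ∈ PySem.List.pyRange (i+1) N, pvContrib se k (i, j) =
        (if j = k then (if PySem.Set.issubset (pvGetSet se i) (pvGetSet se k) = true then [i] else []) else []) := by
      intro j hj
      simp only [pvContrib]
      by_cases hjk : j = k <;> by_cases hs : PySem.Set.issubset (pvGetSet se i) (pvGetSet se j) = true <;>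
        subst_vars <;> simp_all <;> omega
    rw [List.flatMap_congr this,
      pvFlatMap_ite_mem _ _ _ (PySem.List.nodup_pyRange_one _ _),
      if_pos (PySem.List.mem_pyRange_one.mpr ⟨by omega, hkN⟩)]
  have inner_k :
      (PySem.List.pyRange (k+1) N).flatMap (fun j => pvContrib se k (k, j)) =
      (PySem.List.pyRange (k+1) N).filter
        (fun j => PySem.Set.issubset (pvGetSet se j) (pvGetSet se k)) := by
    have : ∀ j ∈ PySem.List.pyRange (k+1) N, pvContrib se k (k, j) =
        (if PySem.Set.issubset (pvGetSet se j) (pvGetSet se k) = true then [j] else []) := by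
      intro j hj
      rcases PySem.List.mem_pyRange_one.mp hj with ⟨hj1, _⟩
      simp only [pvContrib]
      have hjk : ¬ j = k := by omega
      simp [hjk]
    rw [List.flatMap_congr this, pvFlatMap_ite_singleton]
  have inner_hi : ∀ i ∈ PySem.List.pyRange (k+1) N,
      (PySem.List.pyRange (i+1) N).flatMap (fun j => pvContrib se k (i, j)) = [] := by
    intro i hi
    rcases PySem.List.mem_pyRange_one.mp hi with ⟨hi1, _⟩
    have : ∀ j ∈ PySem.List.pyRange (i+1) N, pvContrib se k (i, j) = [] := by
      intro j hj
      rcases PySem.List.mem_pyRange_one.mp hj with ⟨hj1, _⟩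
      simp only [pvContrib]
      have h1 : ¬ i = k := by omega
      have h2 : ¬ j = k := by omega
      simp [h1, h2]
    simp [List.flatMap_congr this]
  have hstep : (pvPairs N).flatMap (pvContrib se k) =
      (PySem.List.pyRange 0 N).flatMap
        (fun i => (PySem.List.pyRange (i+1) N).flatMap (fun j => pvContrib se k (i, j))) := by
    simp only [pvPairs, List.flatMap_assoc, List.flatMap_map]
  rw [hstep]
  simp only [pvVal]
  rw [hsplit, List.flatMap_append, List.filter_append, List.flatMap_cons, List.filter_cons]
  have e1 : (PySem.List.pyRange 0 k).flatMap
      (fun i => (PySem.List.pyRange (i+1) N).flatMap (fun j => pvContrib se k (i, j))) =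
      (PySem.List.pyRange 0 k).filter
        (fun m => decide (m ≠ k) && PySem.Set.issubset (pvGetSet se m) (pvGetSet se k)) := by
    rw [List.flatMap_congr inner_lo, pvFlatMap_ite_singleton]
    apply List.filter_congr
    intro m hm
    rcases PySem.List.mem_pyRange_one.mp hm with ⟨_, hmk⟩
    have : ¬ m = k := by omega
    simp [this]
  have e3 : (PySem.List.pyRange (k+1) N).flatMap
      (fun i => (PySem.List.pyRange (i+1) N).flatMap (fun j => pvContrib se k (i, j))) = [] := by
    rw [List.flatMap_congr inner_hi]; simp
  have e2 : (PySem.List.pyRange (k+1) N).filter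
      (fun j => PySem.Set.issubset (pvGetSet se j) (pvGetSet se k)) =
      (PySem.List.pyRange (k+1) N).filter
        (fun m => decide (m ≠ k) && PySem.Set.issubset (pvGetSet se m) (pvGetSet se k)) := by
    apply List.filter_congr
    intro m hm
    rcases PySem.List.mem_pyRange_one.mp hm with ⟨hm1, _⟩
    have : ¬ m = k := by omega
    simp [this]
  rw [e1, e3, inner_k, e2]
  simp

lemma pvMem_pairs (N : Int) (p : Int × Int) (hp : p ∈ pvPairs N) :
    p.1 ∈ PySem.List.pyRange 0 N ∧ p.2 ∈ PySem.List.pyRange 0 N := by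
  simp only [pvPairs, List.mem_flatMap, List.mem_map] at hp
  rcases hp with ⟨i, hi, j, hj, rfl⟩
  rcases PySem.List.mem_pyRange_one.mp hi with ⟨hi0, hiN⟩
  rcases PySem.List.mem_pyRange_one.mp hj with ⟨hj1, hjN⟩
  exact ⟨hi, PySem.List.mem_pyRange_one.mpr ⟨by omega, hjN⟩⟩

-- A's dict, characterised: key k (in range order) maps to pvVal
lemma pvA_char (se : List (List (List String))) (N : Int) :
    setUnion se N = (PySem.List.pyRange 0 N).map (fun k => (k, pvVal se N k)) := by
  rw [pvA_as_pairs]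
  have hmem : ∀ p ∈ pvPairs N, p.1 ∈ (pvD0 N).keys ∧ p.2 ∈ (pvD0 N).keys := by
    intro p hp; rw [pvKeys_d0]; exact pvMem_pairs N p hp
  have hkeys : ((pvPairs N).foldl (pvStep se) (pvD0 N)).keys = PySem.List.pyRange 0 N := by
    rw [pvKeys_foldl se _ _ hmem, pvKeys_d0]
  have hnodup : ((pvPairs N).foldl (pvStep se) (pvD0 N)).keys.Nodup := by
    rw [hkeys]; exact PySem.List.nodup_pyRange_one _ _
  rw [pvItems_eq_keys_map _ hnodup, hkeys]
  apply List.map_congr_left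
  intro k hk
  have hd0 : (pvD0 N).getD k [] = [] := by
    apply PySem.Dict.getD_of_mem_items (pvD0 N) (v := ([] : List Int))
    · rw [pvItems_d0]; exact List.mem_map.mpr ⟨k, hk, rfl⟩
    · rw [pvKeys_d0]; exact PySem.List.nodup_pyRange_one _ _
  rw [pvGetD_foldl se (pvPairs N) k (pvD0 N), hd0, List.nil_append,
    pvContrib_flatMap se N k hk]

-- ---- B side ----

lemma pvCard_le_of_subset (a b : List String)
    (h : PySem.Set.issubset a b = true) :
    ((PySem.Set.ofList a).length : Int) ≤ ((PySem.Set.ofList b).length : Int) := by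
  have hsub : PySem.Set.ofList a ⊆ PySem.Set.ofList b := by
    intro x hx
    rw [PySem.Set.mem_ofList] at hx ⊢
    exact (PySem.Set.issubset_iff a b).mp h x hx
  have := ((PySem.Set.nodup_ofList a).subperm hsub).length_le
  exact_mod_cast this

lemma pvCollect_eq_filter (se : List (List (List String))) (N k : Int)
    (hk : k ∈ PySem.List.pyRange 0 N) (l : List Int)
    (hp : l.Pairwise (fun a b =>
      PySem.List.pyGetD (((PySem.List.pyRange 0 N).map (fun k => pvGetSet se k)).map
        (fun s => ((PySem.Set.ofList s).length : Int))) a 0 ≤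
      PySem.List.pyGetD (((PySem.List.pyRange 0 N).map (fun k => pvGetSet se k)).map
        (fun s => ((PySem.Set.ofList s).length : Int))) b 0))
    (hmem : ∀ m ∈ l, m ∈ PySem.List.pyRange 0 N) :
    pvCollect ((PySem.List.pyRange 0 N).map (fun k => pvGetSet se k))
      (((PySem.List.pyRange 0 N).map (fun k => pvGetSet se k)).map
        (fun s => ((PySem.Set.ofList s).length : Int))) k l =
    l.filter (fun m => decide (m ≠ k) && PySem.Set.issubset (pvGetSet se m) (pvGetSet se k)) := by
  have hsz : ∀ m ∈ PySem.List.pyRange 0 N,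
      PySem.List.pyGetD (((PySem.List.pyRange 0 N).map (fun k => pvGetSet se k)).map
        (fun s => ((PySem.Set.ofList s).length : Int))) m 0 =
      ((PySem.Set.ofList (pvGetSet se m)).length : Int) := by
    intro m hm
    rcases PySem.List.mem_pyRange_one.mp hm with ⟨hm0, hmN⟩
    rw [List.map_map]
    simpa using PySem.List.pyGetD_map_pyRange_of_nonneg
      (fun x => ((PySem.Set.ofList (pvGetSet se x)).length : Int)) N m 0 hm0 hmN
  have hset : ∀ m ∈ PySem.List.pyRange 0 N,
      PySem.List.pyGetD ((PySem.List.pyRange 0 N).map (fun k => pvGetSet se k)) m [] =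
      pvGetSet se m := by
    intro m hm
    rcases PySem.List.mem_pyRange_one.mp hm with ⟨hm0, hmN⟩
    exact PySem.List.pyGetD_map_pyRange_of_nonneg (fun x => pvGetSet se x) N m [] hm0 hmN
  induction l with
  | nil => rfl
  | cons m t ih =>
    have hm := hmem m (by simp)
    rcases List.pairwise_cons.mp hp with ⟨hrel, hp'⟩
    have hmemt : ∀ x ∈ t, x ∈ PySem.List.pyRange 0 N := fun x hx => hmem x (by simp [hx])
    simp only [pvCollect]
    rw [hsz m hm, hsz k hk]
    by_cases hbr : ((PySem.Set.ofList (pvGetSet se k)).length : Int) <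
        ((PySem.Set.ofList (pvGetSet se m)).length : Int)
    · rw [if_pos hbr]
      symm
      rw [List.filter_eq_nil_iff]
      intro x hx
      have hxk : ((PySem.Set.ofList (pvGetSet se k)).length : Int) <
          ((PySem.Set.ofList (pvGetSet se x)).length : Int) := by
        rcases List.mem_cons.mp hx with rfl | hxt
        · exact hbr
        · have := hrel x hxt
          rw [hsz m hm, hsz x (hmemt x hxt)] at this
          omega
      simp only [Bool.and_eq_true, decide_eq_true_eq, not_and]
      intro _ hsub
      have := pvCard_le_of_subset _ _ hsub
      omega
    · rw [if_neg hbr, hset m hm, hset k hk, ih hp' hmemt]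
      by_cases hc : m ≠ k ∧ PySem.Set.issubset (pvGetSet se m) (pvGetSet se k) = true
      · rw [if_pos hc, List.filter_cons, if_pos (by simp [hc.1, hc.2])]
      · rw [if_neg hc, List.filter_cons, if_neg (by simpa using hc)]

-- a fold overwriting every key of a nodup list: getD of a member is its new value
lemma pvGetD_foldl_insert (v : Int → List Int) (l : List Int) (k : Int) :
    ∀ d : PySem.Dict Int (List Int), l.Nodup → k ∈ l →
      (l.foldl (fun d a => d.insert a (v a)) d).getD k [] = v k := by
  induction l with
  | nil => intro d _ hk; cases hk
  | cons a t ih =>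
    intro d hn hk
    rcases List.nodup_cons.mp hn with ⟨ha, ht⟩
    rw [List.foldl_cons]
    rcases List.mem_cons.mp hk with rfl | hkt
    · -- k ∉ t: the remaining fold never touches key k
      have hstable : ∀ (d' : PySem.Dict Int (List Int)) (t' : List Int), k ∉ t' →
          (t'.foldl (fun d a => d.insert a (v a)) d').getD k [] = d'.getD k [] := by
        intro d' t' hkt'
        induction t' generalizing d' with
        | nil => rfl
        | cons b s ihs =>
          rw [List.foldl_cons, ihs _ (fun h => hkt' (by simp [h]))]
          rw [PySem.Dict.getD_insert]
          rw [if_neg (fun h => hkt' (by simp [h]))]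
      rw [hstable _ t ha, PySem.Dict.getD_insert, if_pos rfl]
    · exact ih _ ht hkt

lemma pvKeys_foldl_insert_same (v : Int → List Int) (l : List Int) :
    ∀ d : PySem.Dict Int (List Int), (∀ a ∈ l, a ∈ d.keys) →
      (l.foldl (fun d a => d.insert a (v a)) d).keys = d.keys := by
  induction l with
  | nil => intro d _; rfl
  | cons a t ih =>
    intro d h
    have hc : d.contains a = true := (PySem.Dict.contains_iff_mem_keys d a).mpr (h a (by simp))
    have hk := PySem.Dict.keys_insert_of_contains d (v a) hc
    rw [List.foldl_cons, ih _ (by intro b hb; rw [hk]; exact h b (by simp [hb])), hk]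

lemma pvB_char (se : List (List (List String))) (N : Int) :
    setUnion_alt se N = (PySem.List.pyRange 0 N).map (fun k => (k, pvVal se N k)) := by
  simp only [setUnion_alt]
  by_cases hN : N < 2
  · rw [if_pos hN]
    have := pvItems_d0 N
    simp only [pvD0] at this
    rw [this]
    apply List.map_congr_left
    intro k hk
    rcases PySem.List.mem_pyRange_one.mp hk with ⟨hk0, hkN⟩
    -- N < 2 and k in range forces N = 1, k = 0; pvVal filters out m = k, so it is []
    have hN1 : N = 1 := by omega
    have hk0' : k = 0 := by omega
    subst hN1; subst hk0'
    have hr : PySem.List.pyRange 0 1 = [0] := by decide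
    simp [pvVal, hr]
  · rw [if_neg hN]
    have hval : ∀ k ∈ PySem.List.pyRange 0 N,
        PySem.List.sorted (pvCollect
          ((PySem.List.pyRange 0 N).map (fun k => pvGetSet se k))
          (((PySem.List.pyRange 0 N).map (fun k => pvGetSet se k)).map
            (fun s => ((PySem.Set.ofList s).length : Int))) k
          (PySem.List.sorted (PySem.List.pyRange 0 N)
            (fun m => PySem.List.pyGetD (((PySem.List.pyRange 0 N).map (fun k => pvGetSet se k)).map
              (fun s => ((PySem.Set.ofList s).length : Int))) m 0)))
          (fun x => x) = pvVal se N k := by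
      intro k hk
      rw [pvCollect_eq_filter se N k hk _
        (PySem.List.sorted_pairwise (PySem.List.pyRange 0 N) _)
        (fun m hm => (PySem.List.mem_sorted _ _ _ m).mp hm)]
      refine PySem.List.sorted_eq_of_perm_of_pairwise_lt _ _ (fun x => x) ?_ ?_
      · exact List.Perm.filter _ (PySem.List.sorted_perm _ _ _).symm
      · exact (PySem.List.pairwise_lt_pyRange_one 0 N).filter _
    have hkeys : ((PySem.List.pyRange 0 N).foldl (fun d k =>
        d.insert k (PySem.List.sorted (pvCollect
          ((PySem.List.pyRange 0 N).map (fun k => pvGetSet se k))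
          (((PySem.List.pyRange 0 N).map (fun k => pvGetSet se k)).map
            (fun s => ((PySem.Set.ofList s).length : Int))) k
          (PySem.List.sorted (PySem.List.pyRange 0 N)
            (fun m => PySem.List.pyGetD (((PySem.List.pyRange 0 N).map (fun k => pvGetSet se k)).map
              (fun s => ((PySem.Set.ofList s).length : Int))) m 0)))
          (fun x => x))) (pvD0 N)).keys =
        PySem.List.pyRange 0 N := by
      rw [pvKeys_foldl_insert_same _ _ _ (by intro a ha; rw [pvKeys_d0]; exact ha), pvKeys_d0]
    rw [show ((PySem.List.pyRange 0 N).foldl (fun d k => d.insert k ([] : List Int))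
        PySem.Dict.empty) = pvD0 N from rfl]
    rw [pvItems_eq_keys_map _ (by rw [hkeys]; exact PySem.List.nodup_pyRange_one _ _), hkeys]
    apply List.map_congr_left
    intro k hk
    rw [pvGetD_foldl_insert _ _ k (pvD0 N) (PySem.List.nodup_pyRange_one _ _) hk]
    rw [hval k hk]

-- ===== VERDICT (by name: the statement is the Claim_ definition above) =====
theorem setUnion_spec : Claim_equal_setUnion := by
  intro se N _ _
  show setUnion se N = setUnion_alt se N
  rw [pvA_char, pvB_char]
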